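-- pv_equiv track=rewrite | github.com/JesperDramsch/advent-of-code | 2022/day15.py | clock
-- ===== SOURCE A (Python) =====
-- def clock(sensor, distance, blocked, y, part):
--     left, right = sensor[1]-distance, sensor[1]+distance+1
--     if part == 1 and not (left <= y[0] < right or left < y[1] <= right):
--         return blocked
--     for i in range(distance+1):
--         if sensor[1] + i not in blocked:
--             blocked[sensor[1] + i] = set()
--         if sensor[1] - i not in blocked:
--             blocked[sensor[1] - i] = set()
--         blocked[sensor[1] - i].add((sensor[0] - distance + i, sensor[0]  + distance - i + 1))
--         blocked[sensor[1] + i].add((sensor[0] - distance + i, sensor[0]  + distance - i + 1))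
--
--     return blocked
-- ===== SOURCE B (Python) =====
-- # Non-mutating rewrite: one pass updating rows already present, then one pass
-- # appending the missing rows (A mutates `blocked` in place; equivalence is about
-- # the return value).
-- def clock(sensor, distance, blocked, y, part):
--     left, right = sensor[1] - distance, sensor[1] + distance + 1
--     if part == 1 and not (left <= y[0] < right or left < y[1] <= right):
--         return blocked
--
--     def interval(row):
--         i = abs(row - sensor[1])
--         return (sensor[0] - distance + i, sensor[0] + distance - i + 1)
--
--     out = {row: (v | {interval(row)} if left <= row < right else v)
--            for row, v in blocked.items()}
--     for i in range(distance + 1):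
--         for row in (sensor[1] + i, sensor[1] - i):
--             if row not in out:
--                 out[row] = {interval(row)}
--     return out
-- ===== Notes on version B (the rewrite author's own statement) =====
-- stated objective: alternative
-- what changed: A interleaves membership tests, empty-set inserts and two set.adds per offset i (touching rows sensor[1]+i and sensor[1]-i inside one loop over offsets); B instead builds the result in two separate passes: one value-updating pass over the rows already present in blocked, then one pass that appends only the missing rows, without mutating the input.
import Mathlib
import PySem

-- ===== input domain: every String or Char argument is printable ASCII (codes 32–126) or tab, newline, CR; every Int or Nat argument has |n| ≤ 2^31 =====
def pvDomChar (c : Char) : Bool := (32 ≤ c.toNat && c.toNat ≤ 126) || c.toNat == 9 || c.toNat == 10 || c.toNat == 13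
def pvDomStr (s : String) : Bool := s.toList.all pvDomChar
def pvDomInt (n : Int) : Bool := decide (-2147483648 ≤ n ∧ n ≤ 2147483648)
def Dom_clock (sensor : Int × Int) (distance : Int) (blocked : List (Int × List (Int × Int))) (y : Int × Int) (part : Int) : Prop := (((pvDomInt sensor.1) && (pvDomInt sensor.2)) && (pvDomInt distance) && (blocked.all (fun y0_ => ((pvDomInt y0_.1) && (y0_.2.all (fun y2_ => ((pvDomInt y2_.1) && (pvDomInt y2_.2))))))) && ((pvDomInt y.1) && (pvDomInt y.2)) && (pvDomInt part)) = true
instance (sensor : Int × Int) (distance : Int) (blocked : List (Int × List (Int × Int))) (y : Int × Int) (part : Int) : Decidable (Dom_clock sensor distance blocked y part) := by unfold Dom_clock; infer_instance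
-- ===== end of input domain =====

-- B replaces A's per-offset loop (membership test + empty-set insert + two set.adds per
-- offset) by one value-updating pass over the rows already present followed by one pass
-- appending only the missing rows; A mutates `blocked` in place while B builds a new dict,
-- so the equivalence proved here is about the RETURN value only.

-- ===== PORT A =====
-- one iteration of A's `for i in range(distance+1)` body
def clockStepA (sensor : Int × Int) (distance : Int) (i : Int)
    (b : PySem.Dict Int (List (Int × Int))) : PySem.Dict Int (List (Int × Int)) :=
  let b1 := if b.contains (sensor.2 + i) then b else b.insert (sensor.2 + i) PySem.Set.empty
  let b2 := if b1.contains (sensor.2 - i) then b1 else b1.insert (sensor.2 - i) PySem.Set.empty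
  let b3 := b2.modify (sensor.2 - i) PySem.Set.empty
      (fun t => PySem.Set.add t (sensor.1 - distance + i, sensor.1 + distance - i + 1))
  b3.modify (sensor.2 + i) PySem.Set.empty
      (fun t => PySem.Set.add t (sensor.1 - distance + i, sensor.1 + distance - i + 1))

def clock (sensor : Int × Int) (distance : Int) (blocked : List (Int × List (Int × Int))) (y : Int × Int) (part : Int) : List (Int × List (Int × Int)) :=
  let left := sensor.2 - distance
  let right := sensor.2 + distance + 1
  if part = 1 ∧ ¬ ((left ≤ y.1 ∧ y.1 < right) ∨ (left < y.2 ∧ y.2 ≤ right)) then blocked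
  else
    ((PySem.List.pyRange 0 (distance + 1) 1).foldl
      (fun b i => clockStepA sensor distance i b) (PySem.Dict.mk blocked)).items

-- ===== PORT B =====
-- Source B's local helper `interval(row)`
def clockInterval (sensor : Int × Int) (distance : Int) (row : Int) : Int × Int :=
  let i : Int := |row - sensor.2|
  (sensor.1 - distance + i, sensor.1 + distance - i + 1)

-- Source B's inner `for row in (sensor[1]+i, sensor[1]-i)` loop
def clockStepB (sensor : Int × Int) (distance : Int) (i : Int)
    (b : PySem.Dict Int (List (Int × Int))) : PySem.Dict Int (List (Int × Int)) :=
  [sensor.2 + i, sensor.2 - i].foldl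
    (fun b row => if b.contains row then b
                  else b.insert row (PySem.Set.ofList [clockInterval sensor distance row])) b

def clock_alt (sensor : Int × Int) (distance : Int) (blocked : List (Int × List (Int × Int))) (y : Int × Int) (part : Int) : List (Int × List (Int × Int)) :=
  let left := sensor.2 - distance
  let right := sensor.2 + distance + 1
  if part = 1 ∧ ¬ ((left ≤ y.1 ∧ y.1 < right) ∨ (left < y.2 ∧ y.2 ≤ right)) then blocked
  else
    let out := PySem.Dict.mk (blocked.map (fun p =>
      if left ≤ p.1 ∧ p.1 < right
      then (p.1, PySem.Set.union p.2 (PySem.Set.ofList [clockInterval sensor distance p.1]))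
      else p))
    ((PySem.List.pyRange 0 (distance + 1) 1).foldl
      (fun b i => clockStepB sensor distance i b) out).items

-- ===== PRECONDITION & SPEC =====
-- Pre_ excludes association lists with duplicate row keys: a Python dict cannot contain a
-- duplicate key, so such lists do not represent any input the Python programs can receive.
def Pre_clock (sensor : Int × Int) (distance : Int) (blocked : List (Int × List (Int × Int))) (y : Int × Int) (part : Int) : Prop :=
  (blocked.map Prod.fst).Nodup
instance (sensor : Int × Int) (distance : Int) (blocked : List (Int × List (Int × Int))) (y : Int × Int) (part : Int) : Decidable (Pre_clock sensor distance blocked y part) := by unfold Pre_clock; infer_instance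

def pvWitness_clock : (Int × Int) × Int × (List (Int × List (Int × Int))) × (Int × Int) × Int :=
  ((2, 3), 1, [(3, [(0, 2)])], (0, 5), 2)

def Spec_clock (sensor : Int × Int) (distance : Int) (blocked : List (Int × List (Int × Int))) (y : Int × Int) (part : Int) (out : List (Int × List (Int × Int))) : Prop := out = clock_alt sensor distance blocked y part
instance (sensor : Int × Int) (distance : Int) (blocked : List (Int × List (Int × Int))) (y : Int × Int) (part : Int) (out : List (Int × List (Int × Int))) : Decidable (Spec_clock sensor distance blocked y part out) := by unfold Spec_clock; infer_instance

-- ===== CLAIM (what is proved, stated in full; the proofs are below) =====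
def Claim_equal_clock : Prop := ∀ (sensor : Int × Int) (distance : Int) (blocked : List (Int × List (Int × Int))) (y : Int × Int) (part : Int), Dom_clock sensor distance blocked y part → Pre_clock sensor distance blocked y part → Spec_clock sensor distance blocked y part (clock sensor distance blocked y part)

-- ===== LEMMAS AND PROOFS =====

-- the interval written by iteration i of A's loop
def clockE (sensor : Int × Int) (distance : Int) (i : Int) : Int × Int :=
  (sensor.1 - distance + i, sensor.1 + distance - i + 1)

-- per-entry update used to describe B's first pass
def uEntry (r : Int) (e : Int × Int) (p : Int × List (Int × Int)) : Int × List (Int × Int) :=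
  if p.1 = r then (p.1, PySem.Set.add p.2 e) else p

-- update-in-place of the (unique) entry with key r, as a map over the items
def updRow (r : Int) (e : Int × Int) (b : PySem.Dict Int (List (Int × Int))) : PySem.Dict Int (List (Int × Int)) :=
  PySem.Dict.mk (b.items.map (uEntry r e))

def updPair (sensor : Int × Int) (distance : Int) (i : Int)
    (b : PySem.Dict Int (List (Int × Int))) : PySem.Dict Int (List (Int × Int)) :=
  updRow (sensor.2 + i) (clockE sensor distance i)
    (updRow (sensor.2 - i) (clockE sensor distance i) b)

def updAll (sensor : Int × Int) (distance : Int) (l : List Int)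
    (b : PySem.Dict Int (List (Int × Int))) : PySem.Dict Int (List (Int × Int)) :=
  l.foldl (fun b i => updPair sensor distance i b) b

theorem keys_updRow (r : Int) (e : Int × Int) (b : PySem.Dict Int (List (Int × Int))) :
    (updRow r e b).keys = b.keys := by
  simp only [updRow, PySem.Dict.keys, List.map_map]
  apply List.map_congr_left
  intro p _
  simp only [Function.comp, uEntry]
  split <;> rfl

theorem contains_updRow (r : Int) (e : Int × Int) (b : PySem.Dict Int (List (Int × Int))) (k : Int) :
    (updRow r e b).contains k = b.contains k := by
  simp only [updRow, PySem.Dict.contains, List.any_map]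
  congr 1
  funext p
  simp only [Function.comp, uEntry]
  split <;> rfl

theorem map_uEntry_of_not_contains (r : Int) (e : Int × Int) (b : PySem.Dict Int (List (Int × Int)))
    (h : b.contains r = false) : b.items.map (uEntry r e) = b.items := by
  have hk : ∀ p ∈ b.items, p.1 ≠ r := by
    intro p hp hpr
    simp only [PySem.Dict.contains, List.any_eq_false] at h
    exact absurd (by simpa using hpr) (by simpa using h p hp)
  rw [List.map_congr_left (g := id) ?_, List.map_id]
  intro p hp
  simp [uEntry, hk p hp]

theorem updRow_of_not_contains (r : Int) (e : Int × Int) (b : PySem.Dict Int (List (Int × Int)))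
    (h : b.contains r = false) : updRow r e b = b := by
  apply PySem.Dict.ext
  exact map_uEntry_of_not_contains r e b h

theorem nodup_keys_updRow (r : Int) (e : Int × Int) (b : PySem.Dict Int (List (Int × Int)))
    (hn : b.keys.Nodup) : (updRow r e b).keys.Nodup := by
  rw [keys_updRow]; exact hn

theorem updRow_of_contains (r : Int) (e : Int × Int) (b : PySem.Dict Int (List (Int × Int)))
    (h : b.contains r = true) (hn : b.keys.Nodup) :
    updRow r e b = b.modify r PySem.Set.empty (fun t => PySem.Set.add t e) := by
  apply PySem.Dict.ext
  have hmod : b.modify r PySem.Set.empty (fun t => PySem.Set.add t e)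
      = b.insert r (PySem.Set.add (b.getD r PySem.Set.empty) e) := rfl
  rw [hmod, PySem.Dict.items_insert_of_contains _ _ h]
  show b.items.map (uEntry r e) = _
  apply List.map_congr_left
  intro p hp
  by_cases hpr : p.1 = r
  · have hmem : (r, p.2) ∈ b.items := by rw [← hpr]; exact hp
    have hget := PySem.Dict.getD_of_mem_items b hmem hn PySem.Set.empty
    rw [show (PySem.Set.empty : PySem.Set (Int × Int)) = [] from rfl] at hget
    simp [uEntry, hpr, hget]
  · simp [uEntry, hpr]

theorem updRow_insert_comm (r k : Int) (e : Int × Int) (v : List (Int × Int))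
    (hrk : r ≠ k) (b : PySem.Dict Int (List (Int × Int))) :
    updRow r e (b.insert k v) = (updRow r e b).insert k v := by
  apply PySem.Dict.ext
  have hc : (updRow r e b).contains k = b.contains k := contains_updRow r e b k
  by_cases h : b.contains k
  · rw [show (updRow r e (b.insert k v)).items = (b.insert k v).items.map (uEntry r e) from rfl,
      PySem.Dict.items_insert_of_contains _ _ h,
      PySem.Dict.items_insert_of_contains _ _ (hc.trans h),
      show (updRow r e b).items = b.items.map (uEntry r e) from rfl,
      List.map_map, List.map_map]
    apply List.map_congr_left
    intro p _
    by_cases hpk : p.1 = k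
    · simp [Function.comp, uEntry, hpk, (Ne.symm hrk)]
    · by_cases hpr : p.1 = r <;>
        simp [Function.comp, uEntry, hpk, hpr, hrk]
  · rw [show (updRow r e (b.insert k v)).items = (b.insert k v).items.map (uEntry r e) from rfl,
      PySem.Dict.items_insert_of_not_contains _ _ (by simpa using h),
      PySem.Dict.items_insert_of_not_contains _ _ (by simp [hc, h]),
      List.map_append]
    simp [uEntry, updRow, Ne.symm hrk]

theorem interval_plus (sensor : Int × Int) (distance i : Int) (hi : 0 ≤ i) :
    clockInterval sensor distance (sensor.2 + i) = clockE sensor distance i := by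
  simp [clockInterval, clockE, abs_of_nonneg hi]

theorem interval_minus (sensor : Int × Int) (distance i : Int) (hi : 0 ≤ i) :
    clockInterval sensor distance (sensor.2 - i) = clockE sensor distance i := by
  have : sensor.2 - i - sensor.2 = -i := by ring
  simp [clockInterval, clockE, this, abs_of_nonneg hi]

theorem set_add_add_self (s : PySem.Set (Int × Int)) (e : Int × Int) :
    PySem.Set.add (PySem.Set.add s e) e = PySem.Set.add s e := by
  by_cases h : e ∈ s
  · simp [PySem.Set.add, PySem.Set.contains, h]
  · simp [PySem.Set.add, PySem.Set.contains, h]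

theorem insert_insert_comm_of_contains (k k' : Int) (v w : List (Int × Int))
    (b : PySem.Dict Int (List (Int × Int))) (h : b.contains k = true) (hne : k ≠ k') :
    (b.insert k' v).insert k w = (b.insert k w).insert k' v := by
  have hk : (b.insert k' v).contains k = true := by
    rw [PySem.Dict.contains_insert]; simp [h]
  have hk' : (b.insert k w).contains k' = b.contains k' := by
    rw [PySem.Dict.contains_insert]; simp [Ne.symm hne]
  apply PySem.Dict.ext
  by_cases hc : b.contains k' = true
  · rw [PySem.Dict.items_insert_of_contains _ _ hk,
      PySem.Dict.items_insert_of_contains _ _ hc,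
      PySem.Dict.items_insert_of_contains _ _ (hk'.trans hc),
      PySem.Dict.items_insert_of_contains _ _ h,
      List.map_map, List.map_map]
    apply List.map_congr_left
    intro p _
    by_cases h1 : p.1 = k' <;> by_cases h2 : p.1 = k <;>
      simp_all [Function.comp, Ne.symm hne]
  · have hcf : b.contains k' = false := by revert hc; cases b.contains k' <;> simp
    rw [PySem.Dict.items_insert_of_contains _ _ hk,
      PySem.Dict.items_insert_of_not_contains _ _ hcf,
      PySem.Dict.items_insert_of_not_contains _ _ (hk'.trans hcf),
      PySem.Dict.items_insert_of_contains _ _ h,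
      List.map_append]
    simp [Ne.symm hne]

theorem stepA_eq_stepB (sensor : Int × Int) (distance : Int) (i : Int) (hi : 0 ≤ i)
    (b : PySem.Dict Int (List (Int × Int))) (hn : b.keys.Nodup) :
    clockStepA sensor distance i b = clockStepB sensor distance i (updPair sensor distance i b) := by
  have hE : PySem.Set.ofList [clockInterval sensor distance (sensor.2 + i)]
      = PySem.Set.add PySem.Set.empty (clockE sensor distance i) := by
    rw [interval_plus sensor distance i hi]
    rfl
  have hE' : PySem.Set.ofList [clockInterval sensor distance (sensor.2 - i)]
      = PySem.Set.add PySem.Set.empty (clockE sensor distance i) := by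
    rw [interval_minus sensor distance i hi]
    rfl
  simp only [clockStepB, updPair, List.foldl_cons, List.foldl_nil, hE, hE', clockStepA,
    PySem.Dict.modify, clockE]
  by_cases hi0 : i = 0
  · subst hi0
    simp only [add_zero, sub_zero]
    by_cases hc : b.contains sensor.2
    · have hc1 : (updRow sensor.2 (sensor.1 - distance, sensor.1 + distance + 1)
          (updRow sensor.2 (sensor.1 - distance, sensor.1 + distance + 1) b)).contains sensor.2 = true := by
        rw [contains_updRow, contains_updRow]; exact hc
      rw [if_pos hc, if_pos hc, if_pos hc1, if_pos hc1]
      rw [updRow_of_contains _ _ b hc hn]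
      have hc2 : (b.modify sensor.2 PySem.Set.empty
          (fun t => PySem.Set.add t (sensor.1 - distance, sensor.1 + distance + 1))).contains sensor.2 = true := by
        simp only [PySem.Dict.modify]; exact PySem.Dict.contains_insert_self _ _ _
      have hn2 : (b.modify sensor.2 PySem.Set.empty
          (fun t => PySem.Set.add t (sensor.1 - distance, sensor.1 + distance + 1))).keys.Nodup := by
        simp only [PySem.Dict.modify]; exact PySem.Dict.nodup_keys_insert _ _ _ hn
      rw [updRow_of_contains _ _ _ hc2 hn2]
      simp only [PySem.Dict.modify]
    · have hb0 : updRow sensor.2 (sensor.1 - distance, sensor.1 + distance + 1) b = b :=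
        updRow_of_not_contains _ _ b (by simpa using hc)
      rw [if_neg hc, hb0, hb0, if_neg hc]
      have ht1 : (b.insert sensor.2 PySem.Set.empty).contains sensor.2 = true :=
        PySem.Dict.contains_insert_self _ _ _
      rw [if_pos ht1]
      have ht2 : (b.insert sensor.2
          (PySem.Set.add PySem.Set.empty (sensor.1 - distance, sensor.1 + distance + 1))).contains sensor.2 = true :=
        PySem.Dict.contains_insert_self _ _ _
      rw [if_pos ht2]
      rw [PySem.Dict.getD_insert_self, PySem.Dict.insert_insert_self,
        PySem.Dict.getD_insert_self, set_add_add_self, PySem.Dict.insert_insert_self]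
  · have hki : sensor.2 + i ≠ sensor.2 - i := by omega
    by_cases hcp : b.contains (sensor.2 + i) <;> by_cases hcm : b.contains (sensor.2 - i)
    · -- both present
      have hu1 := updRow_of_contains (sensor.2 - i) (sensor.1 - distance + i, sensor.1 + distance - i + 1) b hcm hn
      have hcp' : (updRow (sensor.2 - i) (sensor.1 - distance + i, sensor.1 + distance - i + 1) b).contains (sensor.2 + i) = true := by
        rw [contains_updRow]; exact hcp
      have hn' := nodup_keys_updRow (sensor.2 - i) (sensor.1 - distance + i, sensor.1 + distance - i + 1) b hn
      have hu2 := updRow_of_contains (sensor.2 + i) (sensor.1 - distance + i, sensor.1 + distance - i + 1) _ hcp' hn'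
      have hcc1 : (updRow (sensor.2 + i) (sensor.1 - distance + i, sensor.1 + distance - i + 1)
          (updRow (sensor.2 - i) (sensor.1 - distance + i, sensor.1 + distance - i + 1) b)).contains (sensor.2 + i) = true := by
        rw [contains_updRow, contains_updRow]; exact hcp
      have hcc2 : (updRow (sensor.2 + i) (sensor.1 - distance + i, sensor.1 + distance - i + 1)
          (updRow (sensor.2 - i) (sensor.1 - distance + i, sensor.1 + distance - i + 1) b)).contains (sensor.2 - i) = true := by
        rw [contains_updRow, contains_updRow]; exact hcm
      simp only [if_pos hcp, if_pos hcm, if_pos hcc1, if_pos hcc2]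
      rw [hu2, hu1]
      simp only [PySem.Dict.modify]
    · -- k+ present, k- fresh
      have hu1 : updRow (sensor.2 - i) (sensor.1 - distance + i, sensor.1 + distance - i + 1) b = b :=
        updRow_of_not_contains _ _ b (by simpa using hcm)
      have hu2 := updRow_of_contains (sensor.2 + i) (sensor.1 - distance + i, sensor.1 + distance - i + 1) b hcp hn
      have hs1 : (updRow (sensor.2 + i) (sensor.1 - distance + i, sensor.1 + distance - i + 1) b).contains (sensor.2 + i) = true := by
        rw [contains_updRow]; exact hcp
      have hs2 : (updRow (sensor.2 + i) (sensor.1 - distance + i, sensor.1 + distance - i + 1) b).contains (sensor.2 - i) = false := by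
        rw [contains_updRow]; simpa using hcm
      have hs2' : ¬ ((updRow (sensor.2 + i) (sensor.1 - distance + i, sensor.1 + distance - i + 1) b).contains (sensor.2 - i) = true) := by
        rw [hs2]; simp
      simp only [if_pos hcp, if_neg hcm, hu1, if_pos hs1, if_neg hs2']
      rw [hu2]
      simp only [PySem.Dict.modify]
      rw [PySem.Dict.getD_insert_self, PySem.Dict.insert_insert_self,
        PySem.Dict.getD_insert_of_ne _ _ _ hki,
        insert_insert_comm_of_contains _ _ _ _ b hcp hki]
    · -- k+ fresh, k- present
      have hu1 := updRow_of_contains (sensor.2 - i) (sensor.1 - distance + i, sensor.1 + distance - i + 1) b hcm hn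
      have hu2 : updRow (sensor.2 + i) (sensor.1 - distance + i, sensor.1 + distance - i + 1)
          (updRow (sensor.2 - i) (sensor.1 - distance + i, sensor.1 + distance - i + 1) b)
          = updRow (sensor.2 - i) (sensor.1 - distance + i, sensor.1 + distance - i + 1) b :=
        updRow_of_not_contains _ _ _ (by rw [contains_updRow]; simpa using hcp)
      have hb1 : (b.insert (sensor.2 + i) PySem.Set.empty).contains (sensor.2 - i) = true := by
        rw [PySem.Dict.contains_insert]; simp [hcm]
      have hs1 : (updRow (sensor.2 - i) (sensor.1 - distance + i, sensor.1 + distance - i + 1) b).contains (sensor.2 + i) = false := by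
        rw [contains_updRow]; simpa using hcp
      have hs2 : ((updRow (sensor.2 - i) (sensor.1 - distance + i, sensor.1 + distance - i + 1) b).insert (sensor.2 + i)
          (PySem.Set.add PySem.Set.empty (sensor.1 - distance + i, sensor.1 + distance - i + 1))).contains (sensor.2 - i) = true := by
        rw [PySem.Dict.contains_insert, contains_updRow]
        simp [hcm]
      have hs1' : ¬ ((updRow (sensor.2 - i) (sensor.1 - distance + i, sensor.1 + distance - i + 1) b).contains (sensor.2 + i) = true) := by
        rw [hs1]; simp
      simp only [if_neg hcp, if_pos hb1, hu2, if_neg hs1', if_pos hs2]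
      rw [hu1]
      simp only [PySem.Dict.modify]
      rw [PySem.Dict.getD_insert_of_ne _ _ _ (Ne.symm hki),
        PySem.Dict.getD_insert_of_ne _ _ _ hki, PySem.Dict.getD_insert_self,
        insert_insert_comm_of_contains _ _ _ _ (b.insert (sensor.2 + i) PySem.Set.empty)
          (PySem.Dict.contains_insert_self _ _ _) hki,
        PySem.Dict.insert_insert_self,
        insert_insert_comm_of_contains _ _ _ _ b hcm (Ne.symm hki)]
    · -- both fresh
      have hu1 : updRow (sensor.2 - i) (sensor.1 - distance + i, sensor.1 + distance - i + 1) b = b :=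
        updRow_of_not_contains _ _ b (by simpa using hcm)
      have hu2 : updRow (sensor.2 + i) (sensor.1 - distance + i, sensor.1 + distance - i + 1) b = b :=
        updRow_of_not_contains _ _ b (by simpa using hcp)
      have hb1 : (b.insert (sensor.2 + i) PySem.Set.empty).contains (sensor.2 - i) = false := by
        rw [PySem.Dict.contains_insert]; simp [by simpa using hcm, Ne.symm hki]
      have hb2 : ((b.insert (sensor.2 + i)
          (PySem.Set.add PySem.Set.empty (sensor.1 - distance + i, sensor.1 + distance - i + 1)))).contains (sensor.2 - i) = false := by
        rw [PySem.Dict.contains_insert]; simp [by simpa using hcm, Ne.symm hki]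
      have hb1' : ¬ ((b.insert (sensor.2 + i) PySem.Set.empty).contains (sensor.2 - i) = true) := by
        rw [hb1]; simp
      have hb2' : ¬ (((b.insert (sensor.2 + i)
          (PySem.Set.add PySem.Set.empty (sensor.1 - distance + i, sensor.1 + distance - i + 1)))).contains (sensor.2 - i) = true) := by
        rw [hb2]; simp
      simp only [if_neg hcp, if_neg hb1', hu1, hu2, if_neg hb2']
      rw [PySem.Dict.getD_insert_self, PySem.Dict.insert_insert_self,
        PySem.Dict.getD_insert_of_ne _ _ _ hki, PySem.Dict.getD_insert_self,
        insert_insert_comm_of_contains _ _ _ _ (b.insert (sensor.2 + i) PySem.Set.empty)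
          (PySem.Dict.contains_insert_self _ _ _) hki,
        PySem.Dict.insert_insert_self]

theorem updRow_stepB_comm (sensor : Int × Int) (distance : Int) (i : Int) (r : Int) (e : Int × Int)
    (h1 : r ≠ sensor.2 + i) (h2 : r ≠ sensor.2 - i) (b : PySem.Dict Int (List (Int × Int))) :
    updRow r e (clockStepB sensor distance i b) = clockStepB sensor distance i (updRow r e b) := by
  have step : ∀ (row : Int) (d : PySem.Dict Int (List (Int × Int))), r ≠ row →
      updRow r e (if d.contains row then d
        else d.insert row (PySem.Set.ofList [clockInterval sensor distance row]))
      = (if (updRow r e d).contains row then updRow r e d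
        else (updRow r e d).insert row (PySem.Set.ofList [clockInterval sensor distance row])) := by
    intro row d hr
    rw [contains_updRow]
    by_cases h : d.contains row
    · simp [h]
    · have h' : d.contains row = false := by revert h; cases d.contains row <;> simp
      simp [h', updRow_insert_comm r row e _ hr d]
  simp only [clockStepB, List.foldl_cons, List.foldl_nil]
  rw [step (sensor.2 - i) _ h2, step (sensor.2 + i) b h1]

theorem updAll_stepB_comm (sensor : Int × Int) (distance : Int) (i : Int) (hi : 0 ≤ i)
    (t : List Int) (ht : ∀ j ∈ t, 0 ≤ j ∧ j ≠ i) (b : PySem.Dict Int (List (Int × Int))) :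
    updAll sensor distance t (clockStepB sensor distance i b)
      = clockStepB sensor distance i (updAll sensor distance t b) := by
  induction t generalizing b with
  | nil => rfl
  | cons j u ih =>
    have hj := ht j (by simp)
    have hcomm : updPair sensor distance j (clockStepB sensor distance i b)
        = clockStepB sensor distance i (updPair sensor distance j b) := by
      unfold updPair
      rw [updRow_stepB_comm sensor distance i _ _ (by omega) (by omega),
        updRow_stepB_comm sensor distance i _ _ (by omega) (by omega)]
    simp only [updAll, List.foldl_cons]
    rw [hcomm]
    exact ih (fun x hx => ht x (by simp [hx])) _

theorem keys_stepA (sensor : Int × Int) (distance : Int) (i : Int)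
    (b : PySem.Dict Int (List (Int × Int))) (hn : b.keys.Nodup) :
    (clockStepA sensor distance i b).keys.Nodup := by
  simp only [clockStepA, PySem.Dict.modify]
  apply PySem.Dict.nodup_keys_insert
  apply PySem.Dict.nodup_keys_insert
  split
  · split
    · exact hn
    · exact PySem.Dict.nodup_keys_insert _ _ _ hn
  · split
    · exact PySem.Dict.nodup_keys_insert _ _ _ hn
    · exact PySem.Dict.nodup_keys_insert _ _ _ (PySem.Dict.nodup_keys_insert _ _ _ hn)

theorem foldA_eq_foldB (sensor : Int × Int) (distance : Int) (l : List Int)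
    (hl : l.Nodup) (hn : ∀ i ∈ l, 0 ≤ i) (b : PySem.Dict Int (List (Int × Int))) (hb : b.keys.Nodup) :
    l.foldl (fun b i => clockStepA sensor distance i b) b
      = l.foldl (fun b i => clockStepB sensor distance i b) (updAll sensor distance l b) := by
  induction l generalizing b with
  | nil => rfl
  | cons i t ih =>
    have hi : 0 ≤ i := hn i (by simp)
    simp only [List.foldl_cons]
    rw [ih (List.nodup_cons.mp hl).2 (fun x hx => hn x (by simp [hx])) _ (keys_stepA sensor distance i b hb)]
    rw [stepA_eq_stepB sensor distance i hi b hb]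
    rw [updAll_stepB_comm sensor distance i hi t
      (fun j hj => ⟨hn j (by simp [hj]), fun hji => (List.nodup_cons.mp hl).1 (hji ▸ hj)⟩)]
    rfl

theorem updAll_mk (sensor : Int × Int) (distance : Int) (l : List Int) (xs : List (Int × List (Int × Int))) :
    updAll sensor distance l (PySem.Dict.mk xs)
      = PySem.Dict.mk (xs.map (fun p => l.foldl
          (fun p i => uEntry (sensor.2 + i) (clockE sensor distance i)
            (uEntry (sensor.2 - i) (clockE sensor distance i) p)) p)) := by
  induction l generalizing xs with
  | nil => simp [updAll]
  | cons i t ih =>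
    have hstep : updPair sensor distance i (PySem.Dict.mk xs)
        = PySem.Dict.mk (xs.map (fun p => uEntry (sensor.2 + i) (clockE sensor distance i)
            (uEntry (sensor.2 - i) (clockE sensor distance i) p))) := by
      apply PySem.Dict.ext
      show ((PySem.Dict.mk xs).items.map (uEntry (sensor.2 - i) (clockE sensor distance i))).map
          (uEntry (sensor.2 + i) (clockE sensor distance i)) = _
      rw [List.map_map]
      rfl
    simp only [updAll, List.foldl_cons] at *
    rw [hstep, ih, List.map_map]
    rfl

theorem entry_foldl (sensor : Int × Int) (distance : Int) (l : List Int)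
    (hl : l.Nodup) (hn : ∀ i ∈ l, 0 ≤ i) (p : Int × List (Int × Int)) :
    l.foldl (fun p i => uEntry (sensor.2 + i) (clockE sensor distance i)
        (uEntry (sensor.2 - i) (clockE sensor distance i) p)) p
      = if |p.1 - sensor.2| ∈ l
        then (p.1, PySem.Set.add p.2 (clockE sensor distance |p.1 - sensor.2|))
        else p := by
  induction l generalizing p with
  | nil => simp
  | cons i t ih =>
    have hi : 0 ≤ i := hn i (by simp)
    have hnodup := List.nodup_cons.mp hl
    simp only [List.foldl_cons]
    by_cases hp1 : p.1 = sensor.2 + i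
    · by_cases h0 : i = 0
      · subst h0
        have hp1' : p.1 = sensor.2 - 0 := by omega
        rw [ih hnodup.2 (fun x hx => hn x (by simp [hx]))]
        simp only [uEntry, if_pos hp1', if_pos (show (p.1, PySem.Set.add p.2 (clockE sensor distance 0)).1 = sensor.2 + 0 from by simpa using hp1)]
        have habs : |p.1 - sensor.2| = 0 := by rw [hp1]; simp
        rw [habs]
        have h0t : (0 : Int) ∉ t := hnodup.1
        simp only [if_neg (by simpa using h0t), List.mem_cons]
        simp
      · have hne : p.1 ≠ sensor.2 - i := by omega
        rw [ih hnodup.2 (fun x hx => hn x (by simp [hx]))]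
        simp only [uEntry, if_neg hne, if_pos hp1]
        have habs : |p.1 - sensor.2| = i := by rw [hp1]; simp [abs_of_nonneg hi]
        have hit : i ∉ t := hnodup.1
        simp [habs, hit]
    · by_cases hp2 : p.1 = sensor.2 - i
      · have h0 : i ≠ 0 := by omega
        rw [ih hnodup.2 (fun x hx => hn x (by simp [hx]))]
        simp only [uEntry, if_pos hp2, if_neg (show ¬ (p.1, PySem.Set.add p.2 (clockE sensor distance i)).1 = sensor.2 + i from by simpa using hp1)]
        have habs : |p.1 - sensor.2| = i := by
          rw [hp2]
          have : sensor.2 - i - sensor.2 = -i := by ring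
          rw [this, abs_neg, abs_of_nonneg hi]
        have hit : i ∉ t := hnodup.1
        simp [habs, hit]
      · rw [show uEntry (sensor.2 + i) (clockE sensor distance i)
            (uEntry (sensor.2 - i) (clockE sensor distance i) p) = p from by
          simp [uEntry, hp1, hp2]]
        rw [ih hnodup.2 (fun x hx => hn x (by simp [hx]))]
        have habs : |p.1 - sensor.2| ≠ i := by
          intro h
          rcases abs_eq hi |>.mp h with h' | h' <;> omega
        simp [habs]

-- ===== VERDICT (by name: the statement is the Claim_ definition above) =====
theorem clock_spec : Claim_equal_clock := by
  intro sensor distance blocked y part _ hpre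
  unfold Spec_clock
  simp only [clock, clock_alt]
  by_cases hg : part = 1 ∧ ¬ ((sensor.2 - distance ≤ y.1 ∧ y.1 < sensor.2 + distance + 1) ∨
      (sensor.2 - distance < y.2 ∧ y.2 ≤ sensor.2 + distance + 1))
  · rw [if_pos hg, if_pos hg]
  · rw [if_neg hg, if_neg hg]
    have hb : (PySem.Dict.mk blocked).keys.Nodup := by
      simpa [PySem.Dict.keys] using hpre
    rw [foldA_eq_foldB sensor distance _ (PySem.List.nodup_pyRange_one _ _)
      (fun i hi => (PySem.List.mem_pyRange_one.mp hi).1) _ hb]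
    congr 2
    rw [updAll_mk]
    congr 1
    apply List.map_congr_left
    intro p _
    rw [entry_foldl sensor distance _ (PySem.List.nodup_pyRange_one _ _)
      (fun i hi => (PySem.List.mem_pyRange_one.mp hi).1) p]
    by_cases hc : sensor.2 - distance ≤ p.1 ∧ p.1 < sensor.2 + distance + 1
    · have hmem : |p.1 - sensor.2| ∈ PySem.List.pyRange 0 (distance + 1) 1 := by
        rw [PySem.List.mem_pyRange_one]
        refine ⟨abs_nonneg _, ?_⟩
        rcases abs_cases (p.1 - sensor.2) with ⟨h1, _⟩ | ⟨h1, _⟩ <;> omega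
      rw [if_pos hmem, if_pos hc]
      rfl
    · have hmem : |p.1 - sensor.2| ∉ PySem.List.pyRange 0 (distance + 1) 1 := by
        intro hm
        rw [PySem.List.mem_pyRange_one] at hm
        rcases abs_cases (p.1 - sensor.2) with ⟨h1, _⟩ | ⟨h1, _⟩ <;> omega
      rw [if_neg hmem, if_neg hc]
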